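-- pv_equiv track=rewrite | github.com/GedionT/Competitive-programming | Contests/Summer Break Contest/codeforces_contest_div4/D.X-Sum.py | max_bishop_sum
-- ===== SOURCE A (Python) =====
-- from typing import List
--
-- def is_bound(grid: List[List], i: int, j: int) -> bool:
--     return 0 <= i < len(grid) and 0 <= j < len(grid[i])
--
-- def max_bishop_sum(grid: List[List]) -> int:
--     n = len(grid)
--
--     # 4 way diagonal directions
--     directions = [(1, 1), (1, -1), (-1, 1), (-1, -1)]
--
--     # Initialize the max sum
--     max_sum = 0
--
--     # Loop through the grid
--     for i in range(n):
--         for j in range(n):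
--             # do dfs in all 4 directions
--             for direction in directions:
--                 # Initialize the sum
--                 _sum = 0
--                 # Initialize the current position
--                 cur_i = i
--                 cur_j = j
--                 # Loop until we reach the boundary
--                 while is_bound(grid, cur_i, cur_j):
--                     # Add the current value to the sum
--                     _sum += grid[cur_i][cur_j]
--                     # Move to the next position
--                     cur_i += direction[0]
--                     cur_j += direction[1]
--                 # Update the max sum
--                 max_sum = max(max_sum, _sum)
--
--     return max_sum
-- ===== SOURCE B (Python) =====
-- from typing import List
--
-- def max_bishop_sum(grid: List[List]) -> int:
--     # Dynamic programming: for each diagonal direction, compute every ray sum in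
--     # O(1) from the dp row of the neighbouring grid row, instead of re-walking
--     # each ray.  O(n * m) per direction vs A's O(n) walk per cell.
--     n = len(grid)
--     best = 0
--     for di, dj in ((1, 1), (1, -1), (-1, 1), (-1, -1)):
--         rows = grid[::-1] if di == 1 else grid
--         prev = None  # dp row of the previously processed grid row (the row at i+di)
--         dp = []
--         for row in rows:
--             cur = [v + (prev[j + dj] if prev is not None and 0 <= j + dj < len(prev) else 0)
--                    for j, v in enumerate(row)]
--             dp.append(cur)
--             prev = cur
--         if di == 1:
--             dp.reverse()
--         for i in range(n):
--             row = dp[i]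
--             for j in range(min(n, len(row))):
--                 if row[j] > best:
--                     best = row[j]
--     return best
-- ===== Notes on version B (the rewrite author's own statement) =====
-- stated objective: faster
-- what changed: Instead of re-walking every diagonal ray from every cell, B does per-direction dynamic programming: each ray sum is computed in O(1) from the dp row of the adjacent grid row, then the maximum is taken over the same start cells.
import Mathlib
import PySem

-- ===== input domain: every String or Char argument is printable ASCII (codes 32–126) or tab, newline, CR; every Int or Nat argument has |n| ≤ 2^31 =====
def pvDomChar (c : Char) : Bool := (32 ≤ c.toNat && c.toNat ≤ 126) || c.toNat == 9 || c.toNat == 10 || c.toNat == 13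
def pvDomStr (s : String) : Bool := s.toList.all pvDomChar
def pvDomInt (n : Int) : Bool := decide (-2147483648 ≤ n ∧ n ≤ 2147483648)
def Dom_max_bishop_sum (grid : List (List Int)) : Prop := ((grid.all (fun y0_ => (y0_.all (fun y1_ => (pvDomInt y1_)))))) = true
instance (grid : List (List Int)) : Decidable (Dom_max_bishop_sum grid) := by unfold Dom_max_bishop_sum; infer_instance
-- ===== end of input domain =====

-- B replaces A's per-cell diagonal ray walks by per-direction row-by-row dynamic programming (each ray sum from the adjacent row's dp row), an asymptotically faster algorithm with the same result.

-- ===== PORT A =====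
-- Python `0 <= i < len(grid) and 0 <= j < len(grid[i])` (grid[i] only evaluated under the first guard)
def isBound (grid : List (List Int)) (i j : Int) : Bool :=
  if 0 ≤ i ∧ i < (grid.length : Int) then
    decide (0 ≤ j ∧ j < ((((PySem.List.pyGet? grid i).getD []).length : Int)))
  else false

-- grid[cur_i][cur_j]; only read when isBound holds, so the defaults are never used
def getCell (grid : List (List Int)) (i j : Int) : Int :=
  (PySem.List.pyGet? ((PySem.List.pyGet? grid i).getD []) j).getD 0

-- the `while is_bound(...)` loop; fuel grid.length+1 is a totality guard only (the walk moves
-- cur_i by ±1 each step and stays in [0, len(grid)), so it runs at most len(grid) iterations)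
def walkA (grid : List (List Int)) (di dj : Int) : Nat → Int → Int → Int → Int
  | 0, _, _, s => s
  | f + 1, i, j, s =>
    if isBound grid i j then walkA grid di dj f (i + di) (j + dj) (s + getCell grid i j)
    else s

def pvDirsA : List (Int × Int) := [(1, 1), (1, -1), (-1, 1), (-1, -1)]

def max_bishop_sum (grid : List (List Int)) : Int :=
  (PySem.List.pyRange 0 (grid.length : Int) 1).foldl (fun acc i =>
    (PySem.List.pyRange 0 (grid.length : Int) 1).foldl (fun acc j =>
      pvDirsA.foldl (fun acc d =>
        max acc (walkA grid d.1 d.2 (grid.length + 1) i j 0)) acc) acc) 0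

-- ===== PORT B =====
-- cur = [v + (prev[j+dj] if prev is not None and 0 <= j+dj < len(prev) else 0) for j, v in enumerate(row)]
def dpRow (dj : Int) (prev : Option (List Int)) (row : List Int) : List Int :=
  (PySem.List.enumerate row 0).map (fun p =>
    p.2 + (match prev with
           | none => 0
           | some q =>
             if 0 ≤ p.1 + dj ∧ p.1 + dj < (q.length : Int)
             then (PySem.List.pyGet? q (p.1 + dj)).getD 0 else 0))

-- the `for row in rows: ... dp.append(cur); prev = cur` loop
def dpAll (dj : Int) (rows : List (List Int)) : List (List Int) :=
  (rows.foldl (fun (st : List (List Int) × Option (List Int)) row =>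
      let cur := dpRow dj st.2 row
      (st.1 ++ [cur], some cur)) ([], none)).1

-- the final `for i in range(n): for j in range(min(n, len(row))): if row[j] > best: ...` scan
def bestScan (n : Nat) (dp : List (List Int)) (best : Int) : Int :=
  (PySem.List.pyRange 0 (n : Int) 1).foldl (fun b i =>
    let row := (PySem.List.pyGet? dp i).getD []
    (PySem.List.pyRange 0 (min (n : Int) (row.length : Int)) 1).foldl (fun b j =>
      let v := (PySem.List.pyGet? row j).getD 0
      if v > b then v else b) b) best

def max_bishop_sum_alt (grid : List (List Int)) : Int :=
  ([((1 : Int), (1 : Int)), (1, -1), (-1, 1), (-1, -1)]).foldl (fun best d =>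
    let rows := if d.1 = 1 then grid.reverse else grid   -- grid[::-1] for the downward directions
    let dp0 := dpAll d.2 rows
    let dp := if d.1 = 1 then dp0.reverse else dp0       -- dp.reverse() back to grid order
    bestScan grid.length dp best) 0

-- ===== PRECONDITION & SPEC =====
def Spec_max_bishop_sum (grid : List (List Int)) (out : Int) : Prop := out = max_bishop_sum_alt grid
instance (grid : List (List Int)) (out : Int) : Decidable (Spec_max_bishop_sum grid out) := by unfold Spec_max_bishop_sum; infer_instance

-- ===== CLAIM (what is proved, stated in full; the proofs are below) =====
def Claim_equal_max_bishop_sum : Prop := ∀ (grid : List (List Int)), Dom_max_bishop_sum grid → Spec_max_bishop_sum grid (max_bishop_sum grid)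

-- ===== LEMMAS AND PROOFS =====

-- ---- generic max-fold machinery ----
theorem ite_gt_eq_max (b v : Int) : (if b < v then v else b) = max b v := by
  rw [max_def]; split_ifs <;> omega

theorem foldl_max_proj {α : Type} (l : List α) (g : α → Int) (acc : Int) :
    l.foldl (fun a x => max a (g x)) acc = (l.map g).foldl max acc := by
  rw [List.foldl_map]

theorem foldl_max_flat {α : Type} (l : List α) (g : α → List Int) (acc : Int) :
    l.foldl (fun a x => (g x).foldl max a) acc = (l.flatMap g).foldl max acc := by
  induction l generalizing acc with
  | nil => rfl
  | cons x xs ih => simp [List.foldl_append, ih]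

theorem foldl_max_zero_le (a b : List Int)
    (h : ∀ x ∈ a, x ≤ 0 ∨ x ∈ b) : a.foldl max 0 ≤ b.foldl max 0 := by
  rcases PySem.List.foldl_max_mem a 0 with h0 | hm
  · rw [h0]; exact (PySem.List.le_foldl_max b 0).1
  · rcases h _ hm with hle | hb
    · exact le_trans hle (PySem.List.le_foldl_max b 0).1
    · exact (PySem.List.le_foldl_max b 0).2 _ hb

theorem foldl_max_zero_eq (a b : List Int)
    (h1 : ∀ x ∈ a, x ≤ 0 ∨ x ∈ b) (h2 : ∀ x ∈ b, x ≤ 0 ∨ x ∈ a) :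
    a.foldl max 0 = b.foldl max 0 :=
  le_antisymm (foldl_max_zero_le a b h1) (foldl_max_zero_le b a h2)

-- ---- ray specification ----
def rayF (grid : List (List Int)) (di dj : Int) : Nat → Int → Int → Int
  | 0, _, _ => 0
  | f + 1, i, j =>
    if isBound grid i j then getCell grid i j + rayF grid di dj f (i + di) (j + dj) else 0

theorem walkA_eq_rayF (grid : List (List Int)) (di dj : Int) :
    ∀ (f : Nat) (i j s : Int), walkA grid di dj f i j s = s + rayF grid di dj f i j := by
  intro f
  induction f with
  | zero => intro i j s; simp [walkA, rayF]
  | succ f ih =>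
    intro i j s
    simp only [walkA, rayF]
    by_cases h : isBound grid i j
    · simp [h, ih]; ring
    · simp [h]

theorem rayF_of_not_bound (grid : List (List Int)) (di dj : Int) (i j : Int)
    (h : isBound grid i j = false) : ∀ f, rayF grid di dj f i j = 0 := by
  intro f; cases f <;> simp [rayF, h]

-- rayUp above row j : ray sum starting at column j of `row`, continuing through `above`
-- (the rows already processed, nearest first)
def rayUp (dj : Int) : List (List Int) → List Int → Int → Int
  | [], row, j => (PySem.List.pyGet? row j).getD 0
  | a :: rest, row, j =>
    (PySem.List.pyGet? row j).getD 0 +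
      (if 0 ≤ j + dj ∧ j + dj < (a.length : Int) then rayUp dj rest a (j + dj) else 0)

def specRow (dj : Int) (above : List (List Int)) (row : List Int) : List Int :=
  (PySem.List.pyRange 0 (row.length : Int) 1).map (fun k => rayUp dj above row k)

def specList (dj : Int) : List (List Int) → List (List Int) → List (List Int)
  | _, [] => []
  | above, r :: rs => specRow dj above r :: specList dj (r :: above) rs

def prevOf (dj : Int) : List (List Int) → Option (List Int)
  | [] => none
  | a :: rest => some (specRow dj rest a)

theorem specRow_length (dj : Int) (above : List (List Int)) (row : List Int) :
    (specRow dj above row).length = row.length := by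
  simp [specRow, PySem.List.length_pyRange_one]

theorem specRow_get (dj : Int) (above : List (List Int)) (row : List Int) (m : Int)
    (h0 : 0 ≤ m) (h1 : m < (row.length : Int)) :
    (PySem.List.pyGet? (specRow dj above row) m).getD 0 = rayUp dj above row m := by
  show PySem.List.pyGetD (specRow dj above row) m 0 = rayUp dj above row m
  unfold specRow
  exact PySem.List.pyGetD_map_pyRange_of_nonneg _ _ _ _ h0 h1

theorem dpRow_spec (dj : Int) (above : List (List Int)) (row : List Int) :
    dpRow dj (prevOf dj above) row = specRow dj above row := by
  apply List.ext_getElem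
  · simp [dpRow, specRow, PySem.List.length_enumerate]
  · intro k hk hk'
    have hkr : k < row.length := by
      simpa [dpRow, PySem.List.length_enumerate] using hk
    have hke : k < (PySem.List.enumerate row 0).length := by
      simpa [PySem.List.length_enumerate] using hkr
    have hL : (dpRow dj (prevOf dj above) row)[k]'hk =
        row[k] + (match prevOf dj above with
          | none => 0
          | some q =>
            if 0 ≤ (k : Int) + dj ∧ (k : Int) + dj < (q.length : Int)
            then (PySem.List.pyGet? q ((k : Int) + dj)).getD 0 else 0) := by
      simp only [dpRow, List.getElem_map, PySem.List.getElem_enumerate, zero_add]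
    have hR : (specRow dj above row)[k]'hk' = rayUp dj above row (k : Int) := by
      have h2 : (specRow dj above row)[k]? = some (rayUp dj above row (k : Int)) :=
        PySem.List.getElem?_map_pyRange_zero (fun k => rayUp dj above row k)
          row.length k hkr
      rw [List.getElem?_eq_getElem hk'] at h2
      exact Option.some_injective _ h2
    rw [hL, hR]
    have hrow : (PySem.List.pyGet? row ((k : Int))).getD 0 = row[k] := by
      rw [PySem.List.pyGet?_natCast, List.getElem?_eq_getElem hkr]
      rfl
    cases above with
    | nil =>
      simp only [prevOf, rayUp, hrow, add_zero]
    | cons a rest =>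
      simp only [prevOf, rayUp, hrow, specRow_length]
      by_cases hc : 0 ≤ (k : Int) + dj ∧ (k : Int) + dj < (a.length : Int)
      · rw [if_pos hc, if_pos hc, specRow_get dj rest a _ hc.1 hc.2]
      · rw [if_neg hc, if_neg hc]

def dpRows (dj : Int) : Option (List Int) → List (List Int) → List (List Int)
  | _, [] => []
  | prev, r :: rs =>
    dpRow dj prev r :: dpRows dj (some (dpRow dj prev r)) rs

theorem dpAll_go (dj : Int) :
    ∀ (rows acc : List (List Int)) (prev : Option (List Int)),
      (rows.foldl (fun (st : List (List Int) × Option (List Int)) row =>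
        let cur := dpRow dj st.2 row
        (st.1 ++ [cur], some cur)) (acc, prev)).1 = acc ++ dpRows dj prev rows := by
  intro rows
  induction rows with
  | nil => intro acc prev; simp [dpRows]
  | cons r rs ih =>
    intro acc prev
    simp only [List.foldl_cons, dpRows]
    rw [ih]
    simp

theorem dpAll_eq (dj : Int) (rows : List (List Int)) :
    dpAll dj rows = dpRows dj none rows := by
  simpa [dpAll] using dpAll_go dj rows [] none

theorem dpRows_spec (dj : Int) :
    ∀ (rows above : List (List Int)), dpRows dj (prevOf dj above) rows = specList dj above rows := by
  intro rows
  induction rows with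
  | nil => intro above; rfl
  | cons r rs ih =>
    intro above
    show dpRow dj (prevOf dj above) r ::
      dpRows dj (some (dpRow dj (prevOf dj above) r)) rs = _
    rw [dpRow_spec]
    have : some (specRow dj above r) = prevOf dj (r :: above) := rfl
    rw [this, ih (r :: above)]
    rfl

theorem dpAll_spec (dj : Int) (rows : List (List Int)) :
    dpAll dj rows = specList dj [] rows := by
  rw [dpAll_eq]
  exact dpRows_spec dj rows []

theorem specList_length (dj : Int) :
    ∀ (rows above : List (List Int)), (specList dj above rows).length = rows.length := by
  intro rows
  induction rows with
  | nil => intro above; rfl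
  | cons r rs ih => intro above; simp [specList, ih]

theorem specList_getElem (dj : Int) :
    ∀ (rows above : List (List Int)) (k : Nat) (hk : k < rows.length),
      (specList dj above rows)[k]? = some (specRow dj ((rows.take k).reverse ++ above) rows[k]) := by
  intro rows
  induction rows with
  | nil => intro above k hk; simp at hk
  | cons r rs ih =>
    intro above k hk
    cases k with
    | zero => simp [specList]
    | succ k =>
      have hk' : k < rs.length := by simpa using hk
      simp only [specList, List.getElem?_cons_succ, List.getElem_cons_succ]
      rw [ih (r :: above) k hk']
      simp

-- ---- isBound / getCell on Nat indices ----
theorem isBound_nat (grid : List (List Int)) (i : Nat) (j : Int) (hi : i < grid.length) :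
    isBound grid (i : Int) j = decide (0 ≤ j ∧ j < (((grid[i]'hi).length : Int))) := by
  simp only [isBound, PySem.List.pyGet?_natCast, List.getElem?_eq_getElem hi, Option.getD_some]
  rw [if_pos ⟨Int.natCast_nonneg i, by exact_mod_cast hi⟩]

theorem isBound_false_of_out (grid : List (List Int)) (i j : Int)
    (h : ¬ (0 ≤ i ∧ i < (grid.length : Int))) : isBound grid i j = false := by
  simp [isBound, h]

theorem getCell_nat (grid : List (List Int)) (i : Nat) (j : Int) (hi : i < grid.length) :
    getCell grid (i : Int) j = (PySem.List.pyGet? (grid[i]'hi) j).getD 0 := by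
  simp [getCell, PySem.List.pyGet?_natCast, List.getElem?_eq_getElem hi]

-- ---- bridges between rayUp and rayF ----
theorem bridge_pos (grid : List (List Int)) (dj : Int) :
    ∀ (f : Nat) (i : Nat) (j : Int) (hi : i < grid.length), grid.length - i ≤ f →
      0 ≤ j → j < ((grid[i]'hi).length : Int) →
      rayF grid 1 dj f (i : Int) j = rayUp dj (grid.drop (i + 1)) (grid[i]'hi) j := by
  intro f
  induction f with
  | zero => intro i j hi hf h0 h1; omega
  | succ f ih =>
    intro i j hi hf h0 h1
    have hb : isBound grid (i : Int) j = true := by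
      rw [isBound_nat grid i j hi]; simp only [decide_eq_true_iff]; exact ⟨h0, h1⟩
    simp only [rayF, hb, if_true]
    rw [getCell_nat grid i j hi]
    by_cases hnext : i + 1 < grid.length
    · rw [List.drop_eq_getElem_cons hnext]
      simp only [rayUp]
      have hcast : (i : Int) + 1 = ((i + 1 : Nat) : Int) := by push_cast; ring
      by_cases hc : 0 ≤ j + dj ∧ j + dj < (((grid[i+1]'hnext).length : Int))
      · rw [hcast, ih (i + 1) (j + dj) hnext (by omega) hc.1 hc.2, if_pos hc]
      · have hb2 : isBound grid ((i : Int) + 1) (j + dj) = false := by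
          rw [hcast, isBound_nat grid (i + 1) (j + dj) hnext]
          simpa using hc
        rw [rayF_of_not_bound grid 1 dj _ _ hb2 f, if_neg hc]
    · have hdrop : grid.drop (i + 1) = [] := by
        rw [List.drop_eq_nil_iff]; omega
      rw [hdrop]
      simp only [rayUp]
      have hb2 : isBound grid ((i : Int) + 1) (j + dj) = false := by
        apply isBound_false_of_out; omega
      rw [rayF_of_not_bound grid 1 dj _ _ hb2 f, add_zero]

theorem bridge_neg (grid : List (List Int)) (dj : Int) :
    ∀ (f : Nat) (i : Nat) (j : Int) (hi : i < grid.length), i + 1 ≤ f →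
      0 ≤ j → j < ((grid[i]'hi).length : Int) →
      rayF grid (-1) dj f (i : Int) j = rayUp dj ((grid.take i).reverse) (grid[i]'hi) j := by
  intro f
  induction f with
  | zero => intro i j hi hf h0 h1; omega
  | succ f ih =>
    intro i j hi hf h0 h1
    have hb : isBound grid (i : Int) j = true := by
      rw [isBound_nat grid i j hi]; simp only [decide_eq_true_iff]; exact ⟨h0, h1⟩
    simp only [rayF, hb, if_true]
    rw [getCell_nat grid i j hi]
    cases i with
    | zero =>
      simp only [List.take_zero, List.reverse_nil, rayUp]
      have hb2 : isBound grid ((0 : Nat) + (-1) : Int) (j + dj) = false := by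
        apply isBound_false_of_out; omega
      rw [rayF_of_not_bound grid (-1) dj _ _ hb2 f, add_zero]
    | succ i' =>
      have hi' : i' < grid.length := by omega
      have htake : (grid.take (i' + 1)).reverse = grid[i']'hi' :: (grid.take i').reverse := by
        rw [List.take_add_one, List.getElem?_eq_getElem hi']
        simp
      rw [htake]
      simp only [rayUp]
      have hcast : ((i' + 1 : Nat) : Int) + (-1) = (i' : Int) := by push_cast; ring
      by_cases hc : 0 ≤ j + dj ∧ j + dj < (((grid[i']'hi').length : Int))
      · rw [hcast, ih i' (j + dj) hi' (by omega) hc.1 hc.2, if_pos hc]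
      · have hb2 : isBound grid ((i' : Int)) (j + dj) = false := by
          rw [isBound_nat grid i' (j + dj) hi']
          simpa using hc
        rw [hcast, rayF_of_not_bound grid (-1) dj _ _ hb2 f, if_neg hc]

-- ---- the dp table computes rayF ----
def dpOf (grid : List (List Int)) (di dj : Int) : List (List Int) :=
  if di = 1 then (dpAll dj grid.reverse).reverse else dpAll dj grid

theorem dpOf_get (grid : List (List Int)) (di dj : Int)
    (i : Nat) (hi : i < grid.length) :
    (PySem.List.pyGet? (dpOf grid di dj) (i : Int)).getD [] =
      specRow dj (if di = 1 then grid.drop (i + 1) else (grid.take i).reverse) (grid[i]'hi) := by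
  unfold dpOf
  by_cases hd : di = 1
  · simp only [if_pos hd]
    rw [dpAll_spec, PySem.List.pyGet?_natCast]
    have hlen : (specList dj [] grid.reverse).length = grid.length := by
      rw [specList_length]; simp
    have hi' : i < (specList dj [] grid.reverse).reverse.length := by
      simp [hlen, hi]
    rw [List.getElem?_eq_getElem hi', Option.getD_some, List.getElem_reverse]
    have hk : grid.length - 1 - i < grid.reverse.length := by simp; omega
    have hspec := specList_getElem dj grid.reverse [] (grid.length - 1 - i)
      (by simpa using hk)
    rw [List.getElem?_eq_getElem (by rw [hlen]; omega)] at hspec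
    have hval := Option.some_injective _ hspec
    have hidx : (specList dj [] grid.reverse)[(specList dj [] grid.reverse).length - 1 - i]'(by omega) =
        (specList dj [] grid.reverse)[grid.length - 1 - i]'(by rw [hlen]; omega) := by
      congr 1
      rw [hlen]
    rw [hidx, hval]
    have hrev : grid.reverse[grid.length - 1 - i]'hk = grid[i]'hi := by
      rw [List.getElem_reverse]
      congr 1
      omega
    have htake : ((grid.reverse.take (grid.length - 1 - i)).reverse : List (List Int)) =
        grid.drop (i + 1) := by
      rw [List.take_reverse, List.reverse_reverse]
      congr 1
      omega
    rw [List.append_nil, htake, hrev]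
  · simp only [if_neg hd]
    rw [dpAll_spec, PySem.List.pyGet?_natCast]
    have hi' : i < (specList dj [] grid).length := by rw [specList_length]; exact hi
    rw [List.getElem?_eq_getElem hi', Option.getD_some]
    have hspec := specList_getElem dj grid [] i hi
    rw [List.getElem?_eq_getElem hi'] at hspec
    have hval := Option.some_injective _ hspec
    rw [hval, List.append_nil]

theorem dpOf_value (grid : List (List Int)) (di dj : Int) (hdi : di = 1 ∨ di = -1)
    (i j : Nat) (hi : i < grid.length) (hj : j < (grid[i]'hi).length) :
    (PySem.List.pyGet? ((PySem.List.pyGet? (dpOf grid di dj) (i : Int)).getD []) (j : Int)).getD 0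
      = rayF grid di dj (grid.length + 1) (i : Int) (j : Int) := by
  rw [dpOf_get grid di dj i hi]
  rw [specRow_get dj _ _ (j : Int) (Int.natCast_nonneg j) (by exact_mod_cast hj)]
  rcases hdi with h1 | h1
  · subst h1
    rw [if_pos rfl]
    exact (bridge_pos grid dj (grid.length + 1) i j hi (by omega)
      (Int.natCast_nonneg j) (by exact_mod_cast hj)).symm
  · subst h1
    rw [if_neg (by norm_num)]
    exact (bridge_neg grid dj (grid.length + 1) i j hi (by omega)
      (Int.natCast_nonneg j) (by exact_mod_cast hj)).symm

-- ---- flattened forms of the two ports ----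
theorem A_flat (grid : List (List Int)) :
    max_bishop_sum grid =
      ((PySem.List.pyRange 0 (grid.length : Int) 1).flatMap (fun i =>
        (PySem.List.pyRange 0 (grid.length : Int) 1).flatMap (fun j =>
          pvDirsA.map (fun d => walkA grid d.1 d.2 (grid.length + 1) i j 0)))).foldl max 0 := by
  unfold max_bishop_sum
  simp only [foldl_max_proj, foldl_max_flat]

theorem bestScan_flat (n : Nat) (dp : List (List Int)) (best : Int) :
    bestScan n dp best =
      ((PySem.List.pyRange 0 (n : Int) 1).flatMap (fun i =>
        (PySem.List.pyRange 0 (min (n : Int)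
            ((((PySem.List.pyGet? dp i).getD []).length : Int))) 1).map
          (fun j => (PySem.List.pyGet? ((PySem.List.pyGet? dp i).getD []) j).getD 0))).foldl max best := by
  unfold bestScan
  simp only [ite_gt_eq_max, foldl_max_proj, foldl_max_flat]

theorem B_flat (grid : List (List Int)) :
    max_bishop_sum_alt grid =
      (([((1 : Int), (1 : Int)), (1, -1), (-1, 1), (-1, -1)]).flatMap (fun d =>
        (PySem.List.pyRange 0 (grid.length : Int) 1).flatMap (fun i =>
          (PySem.List.pyRange 0 (min (grid.length : Int)
              ((((PySem.List.pyGet? (dpOf grid d.1 d.2) i).getD []).length : Int))) 1).map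
            (fun j => (PySem.List.pyGet? ((PySem.List.pyGet? (dpOf grid d.1 d.2) i).getD []) j).getD 0)))).foldl max 0 := by
  unfold max_bishop_sum_alt
  simp only [List.foldl_cons, List.foldl_nil, List.flatMap_cons, List.flatMap_nil,
    List.append_nil, List.foldl_append, bestScan_flat, dpOf]
  norm_num

-- ===== VERDICT (by name: the statement is the Claim_ definition above) =====
theorem max_bishop_sum_spec : Claim_equal_max_bishop_sum := by
  intro grid _hdom
  unfold Spec_max_bishop_sum
  rw [A_flat, B_flat]
  apply foldl_max_zero_eq
  · intro x hx
    simp only [List.mem_flatMap, List.mem_map, PySem.List.mem_pyRange_one,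
      List.mem_cons, List.not_mem_nil, or_false, pvDirsA] at hx
    obtain ⟨i, ⟨hi0, hin⟩, j, ⟨hj0, hjn⟩, d, hd, rfl⟩ := hx
    have hdi : d.1 = 1 ∨ d.1 = -1 := by
      rcases hd with h | h | h | h <;> subst h <;> simp
    have hiL : i.toNat < grid.length := by omega
    have hiI : ((i.toNat : Nat) : Int) = i := Int.toNat_of_nonneg hi0
    have hjI : ((j.toNat : Nat) : Int) = j := Int.toNat_of_nonneg hj0
    rw [walkA_eq_rayF, zero_add]
    by_cases hj : j.toNat < (grid[i.toNat]'hiL).length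
    · right
      simp only [List.mem_flatMap, List.mem_map, PySem.List.mem_pyRange_one,
        List.mem_cons, List.not_mem_nil, or_false]
      refine ⟨d, hd, i, ⟨hi0, hin⟩, j, ⟨hj0, ?_⟩, ?_⟩
      · rw [← hiI, dpOf_get grid d.1 d.2 i.toNat hiL, specRow_length]
        simp only [lt_min_iff]
        constructor
        · exact hjn
        · omega
      · rw [← hiI, ← hjI, dpOf_value grid d.1 d.2 hdi i.toNat j.toNat hiL hj]
    · left
      have hb : isBound grid i j = false := by
        rw [← hiI, isBound_nat grid i.toNat j hiL]
        simp only [decide_eq_false_iff_not, not_and, not_lt]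
        intro _
        omega
      rw [rayF_of_not_bound grid d.1 d.2 i j hb (grid.length + 1)]
  · intro x hx
    simp only [List.mem_flatMap, List.mem_map, PySem.List.mem_pyRange_one,
      List.mem_cons, List.not_mem_nil, or_false] at hx
    obtain ⟨d, hd, i, ⟨hi0, hin⟩, j, ⟨hj0, hjm⟩, rfl⟩ := hx
    have hdi : d.1 = 1 ∨ d.1 = -1 := by
      rcases hd with h | h | h | h <;> subst h <;> simp
    have hiL : i.toNat < grid.length := by omega
    have hiI : ((i.toNat : Nat) : Int) = i := Int.toNat_of_nonneg hi0
    have hjI : ((j.toNat : Nat) : Int) = j := Int.toNat_of_nonneg hj0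
    have hjrow : j < (((grid[i.toNat]'hiL).length : Int)) := by
      have := hjm
      rw [← hiI, dpOf_get grid d.1 d.2 i.toNat hiL, specRow_length] at this
      exact lt_of_lt_of_le this (min_le_right _ _)
    have hj : j.toNat < (grid[i.toNat]'hiL).length := by omega
    right
    simp only [List.mem_flatMap, List.mem_map, PySem.List.mem_pyRange_one,
      List.mem_cons, List.not_mem_nil, or_false, pvDirsA]
    refine ⟨i, ⟨hi0, hin⟩, j, ⟨hj0, lt_of_lt_of_le hjm (min_le_left _ _)⟩, d, hd, ?_⟩
    rw [walkA_eq_rayF, zero_add, ← hiI, ← hjI,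
      dpOf_value grid d.1 d.2 hdi i.toNat j.toNat hiL hj]
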